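-- pv_equiv track=rewrite | github.com/TaddsTechnology/Huematch-vercel | backend/prods_fastapi/services/color_recommendation_service.py | _prioritize_and_limit_colors
-- ===== SOURCE A (Python) =====
-- from typing import List, Dict, Any, Optional
--
-- def _prioritize_and_limit_colors(all_colors: List[Dict[str, Any]], limit: int) -> List[Dict[str, Any]]:
--     """Prioritize colors and apply limit"""
--     # Remove duplicates by hex code
--     seen_colors = set()
--     unique_colors = []
--
--     for color in all_colors:
--         hex_code = color.get("hex_code", "").lower()
--         if hex_code not in seen_colors:
--             seen_colors.add(hex_code)
--             unique_colors.append(color)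
--
--     if len(unique_colors) <= limit:
--         return unique_colors
--
--     # Prioritize colors from seasonal palettes and comprehensive colors
--     priority_sources = ["seasonal_palette", "comprehensive_colors"]
--     priority_colors = [c for c in unique_colors if c.get("source") in priority_sources]
--     other_colors = [c for c in unique_colors if c.get("source") not in priority_sources]
--
--     # Take priority colors first, then fill with others
--     final_colors = priority_colors[:limit]
--     remaining_slots = limit - len(final_colors)
--
--     if remaining_slots > 0:
--         final_colors.extend(other_colors[:remaining_slots])
--
--     return final_colors
-- ===== SOURCE B (Python) =====
-- from typing import List, Dict, Any
--
-- def _prioritize_and_limit_colors(all_colors: List[Dict[str, Any]], limit: int) -> List[Dict[str, Any]]: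
--     """Prioritize colors and apply limit"""
--     # Dedup by lowercased hex: first occurrence wins (insertion-ordered dict)
--     by_hex = {}
--     for color in all_colors:
--         by_hex.setdefault(color.get("hex_code", "").lower(), color)
--     unique_colors = list(by_hex.values())
--
--     if len(unique_colors) <= limit:
--         return unique_colors
--
--     # Stable sort on a binary key puts priority colors first, keeping order inside each group
--     priority_sources = ["seasonal_palette", "comprehensive_colors"]
--     return sorted(unique_colors, key=lambda c: c.get("source") not in priority_sources)[:limit]
-- ===== Notes on version B (the rewrite author's own statement) =====
-- stated objective: alternative
-- what changed: Dedup is rebuilt as an insertion-ordered dict keyed by lowercased hex (setdefault, first wins) instead of a seen-set plus append loop, and the two filter passes plus slice/extend bookkeeping are replaced by one stable sort on a binary priority key followed by a single [:limit] slice.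
import Mathlib
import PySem

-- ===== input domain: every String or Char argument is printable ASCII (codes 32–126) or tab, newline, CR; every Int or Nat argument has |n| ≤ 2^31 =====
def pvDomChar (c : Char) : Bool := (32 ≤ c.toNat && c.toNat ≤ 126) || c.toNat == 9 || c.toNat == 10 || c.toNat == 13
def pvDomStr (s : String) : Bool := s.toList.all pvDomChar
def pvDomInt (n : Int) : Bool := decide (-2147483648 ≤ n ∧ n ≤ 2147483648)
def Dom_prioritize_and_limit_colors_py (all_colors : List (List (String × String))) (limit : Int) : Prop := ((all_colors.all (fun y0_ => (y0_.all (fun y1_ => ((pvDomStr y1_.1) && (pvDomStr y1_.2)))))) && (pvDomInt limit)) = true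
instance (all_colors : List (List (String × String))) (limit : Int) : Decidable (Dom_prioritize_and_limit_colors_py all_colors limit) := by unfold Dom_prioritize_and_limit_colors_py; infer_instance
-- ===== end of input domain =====

-- B replaces A's seen-set dedup loop by an insertion-ordered dict keyed by lowercased hex,
-- and A's two filter passes + slice/extend by one stable sort on a binary key, then [:limit].
-- Pre_ restricts to nonnegative limits (the natural domain of a count).

-- shared helpers: 'color.get(k, dflt)' / 'color.get(k)' on a color dict given as an assoc list
-- (first match, exactly Python's dict.get since a Python dict has unique keys)
def pvColorGet? (c : List (String × String)) (k : String) : Option String :=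
  (PySem.Dict.mk c).get? k
def pvColorGetD (c : List (String × String)) (k dflt : String) : String :=
  (pvColorGet? c k).getD dflt
-- color.get("hex_code", "").lower()
def pvHexKey (c : List (String × String)) : String :=
  PySem.Str.lower (pvColorGetD c "hex_code" "")
-- c.get("source") in ["seasonal_palette", "comprehensive_colors"] (None if the key is absent; None is not in the list)
def pvIsPriority (c : List (String × String)) : Bool :=
  match pvColorGet? c "source" with
  | some s => s ∈ (["seasonal_palette", "comprehensive_colors"] : List String)
  | none => false

-- ===== PORT A =====
def prioritize_and_limit_colors_py (all_colors : List (List (String × String))) (limit : Int) : List (List (String × String)) :=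
  -- seen_colors = set(); unique_colors = []; for color in all_colors: …
  let st := all_colors.foldl
    (fun (st : PySem.Set String × List (List (String × String))) color =>
      let hex_code := pvHexKey color
      if PySem.Set.contains st.1 hex_code then st
      else (PySem.Set.add st.1 hex_code, st.2 ++ [color]))
    (PySem.Set.empty, [])
  let unique_colors := st.2
  if (unique_colors.length : Int) ≤ limit then unique_colors
  else
    let priority_colors := unique_colors.filter (fun c => pvIsPriority c)
    let other_colors := unique_colors.filter (fun c => !pvIsPriority c)
    let final_colors := PySem.List.slice priority_colors none (some limit)
    let remaining_slots := limit - (final_colors.length : Int)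
    if remaining_slots > 0 then
      final_colors ++ PySem.List.slice other_colors none (some remaining_slots)
    else final_colors

-- ===== PORT B =====
def prioritize_and_limit_colors_py_alt (all_colors : List (List (String × String))) (limit : Int) : List (List (String × String)) :=
  -- by_hex = {}; for color in all_colors: by_hex.setdefault(hex, color); unique_colors = list(by_hex.values())
  let by_hex := all_colors.foldl
    (fun (d : PySem.Dict String (List (String × String))) color =>
      d.setdefault (pvHexKey color) color)
    PySem.Dict.empty
  let unique_colors := by_hex.values
  if (unique_colors.length : Int) ≤ limit then unique_colors
  else
    -- sorted(unique_colors, key=lambda c: c.get("source") not in priority_sources)[:limit]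
    PySem.List.slice (PySem.List.sorted unique_colors (fun c => !pvIsPriority c) false) none (some limit)

-- ===== PRECONDITION & SPEC =====
-- Pre_ excludes negative limits (on which A still returns: it truncates the priority list from
-- the right and drops the others — an accident of slice arithmetic outside the natural domain
-- of a count); B there returns the last |limit| elements removed from the whole prioritized list.
def Pre_prioritize_and_limit_colors_py (all_colors : List (List (String × String))) (limit : Int) : Prop :=
  0 ≤ limit
instance (all_colors : List (List (String × String))) (limit : Int) : Decidable (Pre_prioritize_and_limit_colors_py all_colors limit) := by unfold Pre_prioritize_and_limit_colors_py; infer_instance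

def pvWitness_prioritize_and_limit_colors_py : (List (List (String × String))) × Int :=
  ([[("hex_code", "#A1"), ("source", "seasonal_palette")], [("hex_code", "#b2"), ("source", "db")]], 1)

def Spec_prioritize_and_limit_colors_py (all_colors : List (List (String × String))) (limit : Int) (out : List (List (String × String))) : Prop := out = prioritize_and_limit_colors_py_alt all_colors limit
instance (all_colors : List (List (String × String))) (limit : Int) (out : List (List (String × String))) : Decidable (Spec_prioritize_and_limit_colors_py all_colors limit out) := by unfold Spec_prioritize_and_limit_colors_py; infer_instance

-- ===== CLAIM (what is proved, stated in full; the proofs are below) =====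
def Claim_equal_prioritize_and_limit_colors_py : Prop := ∀ (all_colors : List (List (String × String))) (limit : Int), Dom_prioritize_and_limit_colors_py all_colors limit → Pre_prioritize_and_limit_colors_py all_colors limit → Spec_prioritize_and_limit_colors_py all_colors limit (prioritize_and_limit_colors_py all_colors limit)

-- ===== LEMMAS AND PROOFS =====

-- The two dedup loops build the same unique list: invariant 'seen = keys, items = unique keyed by hex'.
theorem pv_dedup_inv (l : List (List (String × String)))
    (d : PySem.Dict String (List (String × String)))
    (seen : PySem.Set String) (unique : List (List (String × String)))
    (h1 : d.items = unique.map (fun c => (pvHexKey c, c)))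
    (h2 : seen = unique.map pvHexKey) :
    (l.foldl (fun (st : PySem.Set String × List (List (String × String))) color =>
        let hex_code := pvHexKey color
        if PySem.Set.contains st.1 hex_code then st
        else (PySem.Set.add st.1 hex_code, st.2 ++ [color])) (seen, unique)).2
      = (l.foldl (fun d color => d.setdefault (pvHexKey color) color) d).values := by
  induction l generalizing d seen unique with
  | nil =>
    simp [PySem.Dict.values, h1, List.map_map, Function.comp_def]
  | cons c t ih =>
    have hc : PySem.Set.contains seen (pvHexKey c) = d.contains (pvHexKey c) := by
      rw [Bool.eq_iff_iff]
      simp [PySem.Set.contains, h2, h1, PySem.Dict.contains, List.any_map, Function.comp_def,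
        List.any_eq_true]
    simp only [List.foldl_cons]
    by_cases h : d.contains (pvHexKey c) = true
    · rw [PySem.Dict.setdefault_of_contains d c h]
      simp only [hc, h, reduceIte]
      exact ih d seen unique h1 h2
    · have h' : d.contains (pvHexKey c) = false := by simpa using h
      rw [show d.setdefault (pvHexKey c) c = PySem.Dict.mk (d.items ++ [(pvHexKey c, c)]) by
        simp [PySem.Dict.setdefault, h']]
      simp only [hc, h']
      have hnot : ∀ x ∈ unique, ¬ pvHexKey x = pvHexKey c := by
        have hcf := h'
        rw [PySem.Dict.contains, h1] at hcf
        simpa [List.any_map, Function.comp_def] using hcf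
      refine ih _ _ _ ?_ ?_
      · simp [h1]
      · rw [PySem.Set.add]
        rw [show PySem.Set.contains seen (pvHexKey c) = false from hc.trans h']
        simp [h2]

-- A stable sort on a Bool key is 'false group first, true group second', each in original order.
theorem pv_sorted_bool_key {α : Type} (xs : List α) (key : α → Bool) :
    PySem.List.sorted xs key false
      = xs.filter (fun x => !key x) ++ xs.filter (fun x => key x) := by
  rw [PySem.List.sorted_eq_foldl_insertBy]
  induction xs using List.reverseRecOn with
  | nil => simp
  | append_singleton t x ih =>
    rw [List.foldl_append, List.foldl_cons, List.foldl_nil, ih]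
    by_cases hx : key x = true
    · rw [PySem.List.insertBy_of_forall_not_before]
      · simp [List.filter_append, hx]
      · intro y _; cases key y <;> simp [hx, Bool.lt_iff]
    · have hx' : key x = false := by simpa using hx
      have hstep : ∀ (F0 F1 : List α), (∀ a ∈ F0, key a = false) → (∀ a ∈ F1, key a = true) →
          PySem.List.insertBy (fun a b => decide (key a < key b)) x (F0 ++ F1)
            = F0 ++ x :: F1 := by
        intro F0 F1 h0 h1
        induction F0 with
        | nil =>
          cases F1 with
          | nil => simp [PySem.List.insertBy]
          | cons y ys =>
            have : key y = true := h1 y (by simp)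
            simp [PySem.List.insertBy, hx', this, Bool.lt_iff]
        | cons a F0' ih0 =>
          have ha : key a = false := h0 a (by simp)
          simp only [List.cons_append, PySem.List.insertBy]
          rw [if_neg (by simp [hx', ha])]
          simp [ih0 (fun b hb => h0 b (by simp [hb]))]
      rw [hstep _ _ (by intro a ha; simpa using (List.of_mem_filter ha))
            (by intro a ha; simpa using (List.of_mem_filter ha))]
      simp [List.filter_append, hx']

-- ===== VERDICT (by name: the statement is the Claim_ definition above) =====
theorem prioritize_and_limit_colors_py_spec : Claim_equal_prioritize_and_limit_colors_py := by
  intro all_colors limit _ hpre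
  unfold Spec_prioritize_and_limit_colors_py
  unfold prioritize_and_limit_colors_py prioritize_and_limit_colors_py_alt
  simp only []
  rw [← pv_dedup_inv all_colors PySem.Dict.empty PySem.Set.empty [] (by rfl) (by rfl)]
  set unique := (all_colors.foldl
    (fun (st : PySem.Set String × List (List (String × String))) color =>
      let hex_code := pvHexKey color
      if PySem.Set.contains st.1 hex_code then st
      else (PySem.Set.add st.1 hex_code, st.2 ++ [color])) (PySem.Set.empty, [])).2 with hu
  by_cases hlen : (unique.length : Int) ≤ limit
  · simp [hlen]
  · simp only [if_neg hlen]
    rw [pv_sorted_bool_key, PySem.List.slice_to _ hpre, PySem.List.slice_to _ hpre]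
    have hnn : ∀ c, (!!pvIsPriority c) = pvIsPriority c := by intro c; simp
    simp only [Bool.not_not]
    set P := unique.filter (fun c => pvIsPriority c) with hP
    set O := unique.filter (fun c => !pvIsPriority c) with hO
    rw [List.take_append]
    by_cases hcase : limit.toNat ≤ P.length
    · have hfl : (P.take limit.toNat).length = limit.toNat := by
        simp [List.length_take]; omega
      rw [if_neg (by rw [hfl]; omega)]
      simp [Nat.sub_eq_zero_of_le hcase]
    · have hPl : P.length < limit.toNat := by omega
      have hfull : P.take limit.toNat = P := List.take_of_length_le (by omega)
      rw [hfull]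
      rw [if_pos (by omega)]
      congr 1
      rw [PySem.List.slice_to _ (by omega)]
      congr 1
      omega
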